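-- pv_equiv track=rewrite | github.com/thientantran/Python_HackerRank | Collection/PilingUp.py | pile
-- ===== SOURCE A (Python) =====
-- from collections import deque
--
-- def pile(numberList):
--
--     numberDeque = deque(numberList)
--     kq = "Yes"
--     topNumber = (2**31) + 1
--     while kq=="Yes" and len(numberDeque)>0:
--         if (numberDeque[-1] >= numberDeque[0]) and (topNumber >= numberDeque[-1]) :
--             topNumber = numberDeque.pop()
--
--         elif (numberDeque[-1] < numberDeque[0]) and (topNumber >= numberDeque[0]) :
--             topNumber = numberDeque.popleft()
--
--         else:
--
--             kq ="No"
--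
--     return kq
-- ===== SOURCE B (Python) =====
-- def pile(numberList):
--     # Valley check: piling is possible iff the list is non-increasing then
--     # non-decreasing. Single index scan, no deque simulation.
--     n = len(numberList)
--     i = 0
--     while i + 1 < n and numberList[i + 1] <= numberList[i]:
--         i += 1
--     while i + 1 < n and numberList[i + 1] >= numberList[i]:
--         i += 1
--     return "Yes" if i + 1 >= n else "No"
-- ===== Notes on version B (the rewrite author's own statement) =====
-- stated objective: simpler
-- what changed: Replaces the greedy deque pop-simulation (repeatedly taking the larger admissible end under a shrinking watermark) with a direct two-phase index scan checking that the list is valley-shaped (non-increasing then non-decreasing), which within the domain bound |n| <= 2^31 is exactly when the greedy succeeds.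
import Mathlib
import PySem

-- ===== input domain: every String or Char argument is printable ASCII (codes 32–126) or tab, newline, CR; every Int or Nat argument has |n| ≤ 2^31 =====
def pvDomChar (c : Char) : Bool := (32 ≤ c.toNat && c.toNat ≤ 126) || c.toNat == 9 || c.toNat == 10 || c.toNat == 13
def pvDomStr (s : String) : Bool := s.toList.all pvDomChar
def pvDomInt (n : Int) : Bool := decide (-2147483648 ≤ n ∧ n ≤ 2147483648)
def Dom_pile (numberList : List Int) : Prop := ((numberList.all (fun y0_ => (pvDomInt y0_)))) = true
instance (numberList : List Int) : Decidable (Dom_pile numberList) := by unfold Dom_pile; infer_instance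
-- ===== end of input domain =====

-- B replaces A's greedy deque pop-simulation with a direct two-phase valley-shape index scan; objective: simpler.
-- (B has no counterpart of A's 2^31+1 watermark cap, which no input with |n| ≤ 2^31 can reach.)

-- ===== PORT A =====
-- A's while loop: each iteration pops one element from the deque (dq[-1] is rest.getLastD a);
-- fuel = the deque's length (each iteration pops exactly one element), only a totality guard
def pileLoop (fuel : Nat) (dq : List Int) (topNumber : Int) : String :=
  match fuel, dq with
  | _, [] => "Yes"
  | 0, _ :: _ => "No"   -- unreachable: pile passes fuel = length and each step pops one element
  | fuel' + 1, a :: rest =>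
    if rest.getLastD a ≥ a ∧ topNumber ≥ rest.getLastD a then
      pileLoop fuel' (a :: rest).dropLast (rest.getLastD a)
    else if rest.getLastD a < a ∧ topNumber ≥ a then
      pileLoop fuel' rest a
    else "No"

def pile (numberList : List Int) : String :=
  pileLoop numberList.length numberList ((2 ^ 31) + 1)

-- ===== PORT B =====
-- B's first while loop: advance i while numberList[i+1] <= numberList[i]
-- (fuel bounds the iteration count, only a totality guard: i increases by 1 and stays < length)
def scanDown (l : List Int) (fuel i : Nat) : Nat :=
  match fuel with
  | 0 => i
  | fuel' + 1 =>
    if h : i + 1 < l.length then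
      if l[i + 1] ≤ l[i]'(by omega) then scanDown l fuel' (i + 1) else i
    else i

-- B's second while loop: advance i while numberList[i+1] >= numberList[i]
def scanUp (l : List Int) (fuel i : Nat) : Nat :=
  match fuel with
  | 0 => i
  | fuel' + 1 =>
    if h : i + 1 < l.length then
      if l[i + 1] ≥ l[i]'(by omega) then scanUp l fuel' (i + 1) else i
    else i

def pile_alt (numberList : List Int) : String :=
  if scanUp numberList numberList.length (scanDown numberList numberList.length 0) + 1 ≥ numberList.length
  then "Yes" else "No"

-- ===== PRECONDITION & SPEC =====
def Spec_pile (numberList : List Int) (out : String) : Prop := out = pile_alt numberList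
instance (numberList : List Int) (out : String) : Decidable (Spec_pile numberList out) := by unfold Spec_pile; infer_instance

-- ===== CLAIM (what is proved, stated in full; the proofs are below) =====
def Claim_equal_pile : Prop := ∀ (numberList : List Int), Dom_pile numberList → Spec_pile numberList (pile numberList)

-- ===== LEMMAS AND PROOFS =====

-- "valley-shaped": a non-increasing part followed by a non-decreasing part
def IsValley (l : List Int) : Prop :=
  ∃ l₁ l₂ : List Int, l = l₁ ++ l₂ ∧ List.IsChain (· ≥ ·) l₁ ∧ List.IsChain (· ≤ ·) l₂

-- suffix forms of B's two scan loops (proof devices only)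
def upB : List Int → Bool
  | a :: b :: t => if a ≤ b then upB (b :: t) else false
  | _ => true

def downB : List Int → Bool
  | a :: b :: t => if b ≤ a then downB (b :: t) else upB (a :: b :: t)
  | _ => true

-- head–last bounds along a chain
theorem chain_le_getLastD {a : Int} {l : List Int}
    (h : List.IsChain (· ≤ ·) (a :: l)) : a ≤ l.getLastD a := by
  induction l generalizing a with
  | nil => simp
  | cons b t ih =>
    rcases List.isChain_cons_cons.mp h with ⟨hab, ht⟩
    rw [List.getLastD_cons]
    exact le_trans hab (ih ht)

theorem chain_ge_getLastD {a : Int} {l : List Int}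
    (h : List.IsChain (· ≥ ·) (a :: l)) : a ≥ l.getLastD a := by
  induction l generalizing a with
  | nil => simp
  | cons b t ih =>
    rcases List.isChain_cons_cons.mp h with ⟨hab, ht⟩
    rw [List.getLastD_cons]
    exact le_trans (ih ht) hab

theorem getLastD_snoc (u : List Int) (z d : Int) : (u ++ [z]).getLastD d = z := by simp

-- injectivity of snoc
theorem snoc_inj {u v : List Int} {x y : Int} (h : u ++ [x] = v ++ [y]) : u = v ∧ x = y := by
  have h1 : u = v := by have := congrArg List.dropLast h; simpa using this
  have h2 : x = y := by have := congrArg (fun t => t.getLastD x) h; simpa using this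
  exact ⟨h1, h2⟩

theorem getLastD_mem (a : Int) (l : List Int) : l.getLastD a ∈ a :: l := by
  rcases l.eq_nil_or_concat' with rfl | ⟨m, b, rfl⟩
  · simp
  · simp

theorem valley_tail {x : Int} {xs : List Int} (h : IsValley (x :: xs)) : IsValley xs := by
  obtain ⟨l₁, l₂, heq, h₁, h₂⟩ := h
  cases l₁ with
  | nil =>
    cases l₂ with
    | nil => simp at heq
    | cons c t =>
      simp only [List.nil_append, List.cons.injEq] at heq
      exact ⟨[], t, by simp [heq.2], by simp, (heq.1 ▸ h₂).tail⟩
  | cons c l₁' =>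
    simp only [List.cons_append, List.cons.injEq] at heq
    exact ⟨l₁', l₂, heq.2, h₁.tail, h₂⟩

theorem valley_of_concat {m : List Int} {b : Int} (h : IsValley (m ++ [b])) : IsValley m := by
  obtain ⟨l₁, l₂, heq, h₁, h₂⟩ := h
  rcases l₂.eq_nil_or_concat' with rfl | ⟨l₂', x, rfl⟩
  · rw [List.append_nil] at heq
    have : List.IsChain (· ≥ ·) (m ++ [b]) := heq ▸ h₁
    exact ⟨m, [], by simp, (List.isChain_append.mp this).1, by simp⟩
  · have heq' : l₁ ++ l₂' = m ∧ x = b :=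
      snoc_inj (by rw [List.append_assoc]; exact heq.symm)
    exact ⟨l₁, l₂', heq'.1.symm, h₁, (List.isChain_append.mp h₂).1⟩

-- appending b with b ≥ the last element, to a valley starting at x with b ≥ x
theorem valley_concat_iff {x b : Int} {xs : List Int} (hbx : b ≥ x) :
    IsValley ((x :: xs) ++ [b]) ↔ IsValley (x :: xs) ∧ b ≥ xs.getLastD x := by
  constructor
  · intro h
    refine ⟨valley_of_concat h, ?_⟩
    by_contra hlt
    push Not at hlt
    obtain ⟨l₁, l₂, heq, h₁, h₂⟩ := h
    rcases l₂.eq_nil_or_concat' with rfl | ⟨l₂', y, rfl⟩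
    · rw [List.append_nil] at heq
      have hc : List.IsChain (· ≥ ·) ((x :: xs) ++ [b]) := heq ▸ h₁
      have : x ≥ (xs ++ [b]).getLastD x := chain_ge_getLastD (by simpa using hc)
      simp only [List.getLastD_concat] at this
      have hx : x ≥ xs.getLastD x := chain_ge_getLastD (by
        have := (List.isChain_append.mp hc).1; simpa using this)
      omega
    · have heq' : l₁ ++ l₂' = x :: xs ∧ y = b :=
        snoc_inj (by rw [List.append_assoc]; exact heq.symm)
      rcases l₂'.eq_nil_or_concat' with rfl | ⟨l₂'', z, rfl⟩
      · -- l₂ = [b], so l₁ = x :: xs is non-increasing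
        have hm : l₁ = x :: xs := by simpa using heq'.1
        have hc : List.IsChain (· ≥ ·) (x :: xs) := hm ▸ h₁
        have hx : x ≥ xs.getLastD x := chain_ge_getLastD hc
        omega
      · -- l₂ = (l₂'' ++ [z]) ++ [b] non-decreasing, z is the last of x :: xs
        have hzlast : z = xs.getLastD x := by
          have h0 : (l₁ ++ (l₂'' ++ [z])).getLastD x = (x :: xs).getLastD x := by
            rw [heq'.1]
          rw [List.getLastD_cons, ← List.append_assoc, getLastD_snoc] at h0
          exact h0
        have hc : List.IsChain (· ≤ ·) ((l₂'' ++ [z]) ++ [b]) := heq'.2 ▸ h₂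
        have : z ≤ b := by
          rcases List.isChain_append.mp hc with ⟨-, -, hrel⟩
          exact hrel z (by simp) b (by simp)
        omega
  · rintro ⟨⟨l₁, l₂, heq, h₁, h₂⟩, hge⟩
    rcases l₂.eq_nil_or_concat' with rfl | ⟨l₂', y, rfl⟩
    · refine ⟨l₁, [b], ?_, h₁, by simp⟩
      rw [List.append_nil] at heq
      rw [heq]
    · refine ⟨l₁, (l₂' ++ [y]) ++ [b], by rw [heq]; simp, h₁, ?_⟩
      have hy : y = xs.getLastD x := by
        have h0 : (x :: xs).getLastD x = (l₁ ++ (l₂' ++ [y])).getLastD x := by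
          rw [heq]
        rw [List.getLastD_cons, ← List.append_assoc, getLastD_snoc] at h0
        exact h0.symm
      refine List.IsChain.append h₂ (by simp) ?_
      intro p hp q hq
      simp only [List.getLast?_concat, Option.mem_def, Option.some.injEq] at hp
      simp only [List.head?_cons, Option.mem_def, Option.some.injEq] at hq
      subst hp hq
      omega

-- popping the left end: a ≥ everything relevant, tail keeps the valley shape
theorem valley_cons_iff {a r : Int} {rest' : List Int} (hlt : rest'.getLastD r < a) :
    IsValley (a :: r :: rest') ↔ IsValley (r :: rest') ∧ a ≥ r := by
  constructor
  · intro h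
    refine ⟨valley_tail h, ?_⟩
    by_contra har
    push Not at har
    obtain ⟨l₁, l₂, heq, h₁, h₂⟩ := h
    cases l₁ with
    | nil =>
      have hc : List.IsChain (· ≤ ·) (a :: r :: rest') := by
        rw [List.nil_append] at heq; exact heq ▸ h₂
      have := chain_le_getLastD hc
      simp only [List.getLastD_cons] at this
      omega
    | cons c l₁' =>
      simp only [List.cons_append, List.cons.injEq] at heq
      obtain ⟨rfl, heq2⟩ := heq
      cases l₁' with
      | nil =>
        rw [List.nil_append] at heq2
        subst heq2
        have := chain_le_getLastD h₂
        omega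
      | cons d l₁'' =>
        simp only [List.cons_append, List.cons.injEq] at heq2
        obtain ⟨rfl, -⟩ := heq2
        exact absurd (List.rel_of_isChain_cons_cons h₁) (by omega)
  · rintro ⟨⟨l₁, l₂, heq, h₁, h₂⟩, har⟩
    cases l₁ with
    | nil =>
      rw [List.nil_append] at heq
      subst heq
      exact ⟨[a], r :: rest', by simp, by simp, h₂⟩
    | cons c l₁' =>
      simp only [List.cons_append, List.cons.injEq] at heq
      obtain ⟨rfl, heq2⟩ := heq
      exact ⟨a :: r :: l₁', l₂, by simp [heq2], List.isChain_cons_cons.mpr ⟨har, h₁⟩, h₂⟩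

-- ----- characterisation of B's scans -----

theorem upB_iff_chain (l : List Int) : upB l = true ↔ List.IsChain (· ≤ ·) l := by
  induction l with
  | nil => simp [upB]
  | cons a t ih =>
    cases t with
    | nil => simp [upB]
    | cons b t' =>
      rw [upB, List.isChain_cons_cons]
      split
      · rw [ih]; simp_all
      · simp_all

theorem downB_iff_valley (l : List Int) : downB l = true ↔ IsValley l := by
  induction l with
  | nil => exact ⟨fun _ => ⟨[], [], by simp, by simp, by simp⟩, fun _ => rfl⟩
  | cons a t ih =>
    cases t with
    | nil =>
      exact ⟨fun _ => ⟨[a], [], by simp, by simp, by simp⟩, fun _ => rfl⟩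
    | cons b t' =>
      rw [downB]
      split
      · -- b ≤ a : down phase continues
        rename_i hba
        rw [ih]
        constructor
        · rintro ⟨l₁, l₂, heq, h₁, h₂⟩
          cases l₁ with
          | nil =>
            rw [List.nil_append] at heq
            subst heq
            exact ⟨[a], b :: t', by simp, by simp, h₂⟩
          | cons c l₁' =>
            simp only [List.cons_append, List.cons.injEq] at heq
            obtain ⟨rfl, heq2⟩ := heq
            exact ⟨a :: b :: l₁', l₂, by simp [heq2],
              List.isChain_cons_cons.mpr ⟨by omega, h₁⟩, h₂⟩
        · exact valley_tail
      · -- a < b : remainder must be non-decreasing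
        rename_i hba
        rw [upB_iff_chain]
        constructor
        · intro h
          exact ⟨[], a :: b :: t', by simp, by simp, h⟩
        · rintro ⟨l₁, l₂, heq, h₁, h₂⟩
          cases l₁ with
          | nil => rw [List.nil_append] at heq; subst heq; exact h₂
          | cons c l₁' =>
            simp only [List.cons_append, List.cons.injEq] at heq
            obtain ⟨rfl, heq2⟩ := heq
            cases l₁' with
            | nil =>
              rw [List.nil_append] at heq2
              subst heq2
              exact List.isChain_cons_cons.mpr ⟨by omega, h₂⟩
            | cons d l₁'' =>
              simp only [List.cons_append, List.cons.injEq] at heq2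
              obtain ⟨rfl, -⟩ := heq2
              exact absurd (List.rel_of_isChain_cons_cons h₁) (by omega)

theorem scanUp_char (l : List Int) :
    ∀ (fuel i : Nat), i < l.length → l.length ≤ fuel + i + 1 →
      ((scanUp l fuel i + 1 ≥ l.length) ↔ upB (l.drop i) = true) := by
  intro fuel
  induction fuel with
  | zero =>
    intro i hi hf
    have hlen : l.length = i + 1 := by omega
    rw [List.drop_eq_getElem_cons hi, List.drop_eq_nil_of_le (by omega : l.length ≤ i + 1)]
    simp [scanUp, upB, hlen]
  | succ fuel ih =>
    intro i hi hf
    simp only [scanUp]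
    by_cases h : i + 1 < l.length
    · rw [dif_pos h]
      rw [List.drop_eq_getElem_cons hi, List.drop_eq_getElem_cons h, upB]
      by_cases hle : l[i + 1]'h ≥ l[i]'(by omega)
      · rw [if_pos hle, if_pos hle]
        rw [← List.drop_eq_getElem_cons h]
        exact ih (i + 1) h (by omega)
      · rw [if_neg hle, if_neg hle]
        simp only [Bool.false_eq_true, iff_false]
        omega
    · rw [dif_neg h]
      have hlen : l.length = i + 1 := by omega
      rw [List.drop_eq_getElem_cons hi, List.drop_eq_nil_of_le (by omega : l.length ≤ i + 1)]
      simp [upB, hlen]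

theorem scanDown_char (l : List Int) :
    ∀ (fuel i : Nat), i < l.length → l.length ≤ fuel + i + 1 →
      ((scanUp l l.length (scanDown l fuel i) + 1 ≥ l.length) ↔ downB (l.drop i) = true) := by
  intro fuel
  induction fuel with
  | zero =>
    intro i hi hf
    have hup : scanUp l l.length i + 1 ≥ l.length := by
      rw [scanUp_char l l.length i hi (by omega)]
      rw [List.drop_eq_getElem_cons hi, List.drop_eq_nil_of_le (by omega : l.length ≤ i + 1)]
      rfl
    rw [List.drop_eq_getElem_cons hi, List.drop_eq_nil_of_le (by omega : l.length ≤ i + 1)]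
    exact ⟨fun _ => rfl, fun _ => hup⟩
  | succ fuel ih =>
    intro i hi hf
    simp only [scanDown]
    by_cases h : i + 1 < l.length
    · rw [dif_pos h]
      rw [List.drop_eq_getElem_cons hi, List.drop_eq_getElem_cons h, downB]
      by_cases hle : l[i + 1]'h ≤ l[i]'(by omega)
      · rw [if_pos hle, if_pos hle]
        rw [← List.drop_eq_getElem_cons h]
        exact ih (i + 1) h (by omega)
      · rw [if_neg hle, if_neg hle]
        rw [← List.drop_eq_getElem_cons h, ← List.drop_eq_getElem_cons hi]
        exact scanUp_char l l.length i hi (by omega)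
    · rw [dif_neg h]
      have hlen : l.length = i + 1 := by omega
      rw [List.drop_eq_getElem_cons hi, List.drop_eq_nil_of_le (by omega : l.length ≤ i + 1)]
      have hu : scanUp l l.length i + 1 ≥ l.length ↔ True := by
        rw [scanUp_char l l.length i hi (by omega)]
        rw [List.drop_eq_getElem_cons hi, List.drop_eq_nil_of_le (by omega : l.length ≤ i + 1)]
        simp [upB]
      rw [hu]
      simp [downB]

theorem pile_alt_yes_iff (l : List Int) : pile_alt l = "Yes" ↔ IsValley l := by
  cases l with
  | nil =>
    constructor
    · intro _; exact ⟨[], [], by simp, by simp, by simp⟩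
    · intro _
      simp [pile_alt, scanDown, scanUp]
  | cons a t =>
    rw [pile_alt]
    have h := scanDown_char (a :: t) (a :: t).length 0 (by simp) (by simp)
    rw [List.drop_zero, downB_iff_valley] at h
    split
    · simpa using h.mp (by assumption)
    · constructor
      · intro hc; simp at hc
      · intro hv; exact absurd (h.mpr hv) (by assumption)

theorem pile_alt_eq (l : List Int) : pile_alt l = "Yes" ∨ pile_alt l = "No" := by
  rw [pile_alt]; split <;> simp

-- ----- characterisation of A's loop -----

theorem pileLoop_eq :
    ∀ (fuel : Nat) (dq : List Int) (top : Int),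
      pileLoop fuel dq top = "Yes" ∨ pileLoop fuel dq top = "No" := by
  intro fuel
  induction fuel with
  | zero => intro dq top; cases dq <;> simp [pileLoop]
  | succ n ih =>
    intro dq top
    cases dq with
    | nil => simp [pileLoop]
    | cons a rest =>
      simp only [pileLoop]
      split
      · exact ih _ _
      · split
        · exact ih _ _
        · right; rfl

theorem pileLoop_yes_iff :
    ∀ (fuel : Nat) (a : Int) (rest : List Int) (top : Int), rest.length < fuel →
      (pileLoop fuel (a :: rest) top = "Yes" ↔
        IsValley (a :: rest) ∧ top ≥ a ∧ top ≥ rest.getLastD a) := by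
  intro fuel
  induction fuel with
  | zero => intro a rest top hlen; omega
  | succ n ih =>
    intro a rest top hlen
    simp only [pileLoop]
    cases rest with
    | nil =>
      simp only [List.getLastD_nil]
      split
      · rename_i hcond
        have h0 : pileLoop n ([a] : List Int).dropLast a = "Yes" := by cases n <;> rfl
        rw [h0]
        constructor
        · intro _
          exact ⟨⟨[a], [], by simp, by simp, by simp⟩, by omega, by omega⟩
        · intro _; rfl
      · split
        · rename_i h1 h2
          exact absurd h2.1 (lt_irrefl a)
        · rename_i h1 h2
          constructor
          · intro hc; simp at hc
          · rintro ⟨-, ha, -⟩; exact absurd ⟨le_refl a, ha⟩ h1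
    | cons r rest' =>
      set lst := (r :: rest').getLastD a with hlst
      have hlst' : lst = rest'.getLastD r := hlst.trans (List.getLastD_cons ..)
      split
      · -- pop right: recurse on dropLast
        rename_i hcond
        obtain ⟨hla, htl⟩ := hcond
        -- a :: r :: rest' = (a :: (r :: rest').dropLast) ++ [lst]
        have hsplit : a :: r :: rest' = (a :: (r :: rest').dropLast) ++ [lst] := by
          have h9 := List.dropLast_append_getLast (l := r :: rest') (by simp)
          rw [List.getLast_eq_getLastD, ← hlst'] at h9
          rw [List.cons_append, h9]
        have hdl : (a :: r :: rest').dropLast = a :: (r :: rest').dropLast := by simp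
        rw [hdl]
        have hlen' : ((r :: rest').dropLast).length < n := by
          simp only [List.length_dropLast, List.length_cons] at *
          omega
        rw [ih a ((r :: rest').dropLast) lst hlen']
        have hval : IsValley (a :: r :: rest') ↔
            IsValley (a :: (r :: rest').dropLast) ∧
              lst ≥ ((r :: rest').dropLast).getLastD a := by
          rw [hsplit] at *
          exact valley_concat_iff hla
        constructor
        · rintro ⟨hv, hga, hgl⟩
          exact ⟨hval.mpr ⟨hv, hgl⟩, by omega, by omega⟩
        · rintro ⟨hv, -, -⟩
          have := hval.mp hv
          exact ⟨this.1, hla, this.2⟩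
      · split
        · -- pop left: recurse on tail
          rename_i h1 hcond
          obtain ⟨hla, hta⟩ := hcond
          have hlen' : rest'.length < n := by
            simp only [List.length_cons] at hlen; omega
          rw [ih r rest' a hlen']
          have hval : IsValley (a :: r :: rest') ↔ IsValley (r :: rest') ∧ a ≥ r :=
            valley_cons_iff (by omega)
          constructor
          · rintro ⟨hv, har, -⟩
            refine ⟨hval.mpr ⟨hv, har⟩, hta, ?_⟩
            rw [hlst']; omega
          · rintro ⟨hv, -, -⟩
            have := hval.mp hv
            exact ⟨this.1, this.2, by omega⟩
        · -- stuck: "No"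
          rename_i h1 h2
          constructor
          · intro hc; simp at hc
          · rintro ⟨-, ha, hl⟩
            rcases le_or_gt a lst with h | h
            · exact absurd ⟨h, hl⟩ h1
            · exact absurd ⟨h, ha⟩ h2

theorem pile_yes_iff (l : List Int) (hd : Dom_pile l) : pile l = "Yes" ↔ IsValley l := by
  cases l with
  | nil =>
    rw [pile]
    exact ⟨fun _ => ⟨[], [], by simp, by simp, by simp⟩, fun _ => rfl⟩
  | cons a rest =>
    rw [pile, pileLoop_yes_iff ((a :: rest).length) a rest ((2 : Int) ^ 31 + 1) (by simp)]
    have hmem : ∀ x ∈ a :: rest, (2 : Int) ^ 31 + 1 ≥ x := by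
      intro x hx
      have := (List.all_eq_true.mp hd) x hx
      simp only [pvDomInt, decide_eq_true_eq] at this
      norm_num
      omega
    have h1 : (2 : Int) ^ 31 + 1 ≥ a := hmem a (by simp)
    have h2 : (2 : Int) ^ 31 + 1 ≥ rest.getLastD a := hmem _ (getLastD_mem a rest)
    constructor
    · rintro ⟨hv, -, -⟩; exact hv
    · intro hv; exact ⟨hv, h1, h2⟩

-- ===== VERDICT (by name: the statement is the Claim_ definition above) =====
theorem pile_spec : Claim_equal_pile := by
  intro l hd
  unfold Spec_pile
  have hA := pile_yes_iff l hd
  have hB := pile_alt_yes_iff l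
  have hor : pile l = "Yes" ∨ pile l = "No" := pileLoop_eq l.length l ((2 : Int) ^ 31 + 1)
  by_cases hv : IsValley l
  · rw [hA.mpr hv, hB.mpr hv]
  · rcases hor with h | h
    · exact absurd (hA.mp h) hv
    · rcases pile_alt_eq l with h' | h'
      · exact absurd (hB.mp h') hv
      · rw [h, h']
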